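-- pv_equiv track=rewrite | github.com/john-holland/system-drawer | Scripts/video_storage_tool/video_to_script.py | _grid_position_labels
-- ===== SOURCE A (Python) =====
-- def _grid_position_labels(rows: int, cols: int) -> list[str]:
--     """Return prepositional labels for grid cells in row-major order (e.g. top-left, top-right, …)."""
--     labels = []
--     for r in range(rows):
--         for c in range(cols):
--             if rows == 1 and cols == 1:
--                 labels.append("In the center")
--             else:
--                 rn = "top" if r == 0 else ("bottom" if r == rows - 1 else "middle")
--                 cn = "center" if cols == 1 else ("left" if c == 0 else ("right" if c == cols - 1 else "center"))
--                 if rows == 1: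
--                     labels.append(f"To the {cn}")
--                 elif cols == 1:
--                     labels.append(f"At the {rn}")
--                 else:
--                     labels.append(f"In the {rn}-{cn}")
--     return labels
-- ===== SOURCE B (Python) =====
-- def _grid_position_labels(rows: int, cols: int) -> list[str]:
--     """Return prepositional labels for grid cells in row-major order (e.g. top-left, top-right, ...)."""
--     if rows <= 0 or cols <= 0:
--         return []
--     if rows == 1 and cols == 1:
--         return ["In the center"]
--     row_names = ["top" if r == 0 else "bottom" if r == rows - 1 else "middle"
--                  for r in range(rows)]
--     col_names = ["left" if c == 0 else "right" if c == cols - 1 else "center"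
--                  for c in range(cols)]
--     if rows == 1:
--         return [f"To the {cn}" for cn in col_names]
--     if cols == 1:
--         return [f"At the {rn}" for rn in row_names]
--     return [f"In the {rn}-{cn}" for rn in row_names for cn in col_names]
-- ===== Notes on version B (the rewrite author's own statement) =====
-- stated objective: simpler
-- what changed: Dispatch on the grid shape once before iterating and build the labels from precomputed row/column descriptor tables, instead of A's nested cell loop re-testing the shape for every cell.
import Mathlib
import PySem

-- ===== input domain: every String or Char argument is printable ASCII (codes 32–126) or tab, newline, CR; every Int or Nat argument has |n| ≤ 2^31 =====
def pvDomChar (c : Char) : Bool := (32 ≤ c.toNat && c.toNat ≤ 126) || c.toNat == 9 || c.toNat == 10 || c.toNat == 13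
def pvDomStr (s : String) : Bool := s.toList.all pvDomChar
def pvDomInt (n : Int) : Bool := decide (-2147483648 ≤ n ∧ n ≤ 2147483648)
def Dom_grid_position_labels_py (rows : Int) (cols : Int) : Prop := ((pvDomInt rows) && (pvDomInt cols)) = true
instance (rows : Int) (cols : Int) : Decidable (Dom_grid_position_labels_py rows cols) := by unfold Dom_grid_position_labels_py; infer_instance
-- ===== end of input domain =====

-- B builds the labels from precomputed row/column descriptor tables after a single
-- shape dispatch, instead of A's nested cell loop re-testing the shape per cell (simpler).

-- ===== PORT A =====
def grid_position_labels_py (rows : Int) (cols : Int) : List String :=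
  (PySem.List.pyRange 0 rows 1).foldl (fun labels r =>
    (PySem.List.pyRange 0 cols 1).foldl (fun labels c =>
      if rows == 1 && cols == 1 then labels ++ ["In the center"]
      else
        let rn := if r == 0 then "top" else if r == rows - 1 then "bottom" else "middle"
        let cn := if cols == 1 then "center" else if c == 0 then "left" else if c == cols - 1 then "right" else "center"
        if rows == 1 then labels ++ ["To the " ++ cn]
        else if cols == 1 then labels ++ ["At the " ++ rn]
        else labels ++ ["In the " ++ rn ++ "-" ++ cn]) labels) []

-- ===== PORT B =====
def grid_position_labels_py_alt (rows : Int) (cols : Int) : List String :=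
  if rows ≤ 0 || cols ≤ 0 then []
  else if rows == 1 && cols == 1 then ["In the center"]
  else
    let row_names := (PySem.List.pyRange 0 rows 1).map (fun r =>
      if r == 0 then "top" else if r == rows - 1 then "bottom" else "middle")
    let col_names := (PySem.List.pyRange 0 cols 1).map (fun c =>
      if c == 0 then "left" else if c == cols - 1 then "right" else "center")
    if rows == 1 then col_names.map (fun cn => "To the " ++ cn)
    else if cols == 1 then row_names.map (fun rn => "At the " ++ rn)
    else row_names.flatMap (fun rn => col_names.map (fun cn => "In the " ++ rn ++ "-" ++ cn))

-- ===== PRECONDITION & SPEC =====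
def Spec_grid_position_labels_py (rows : Int) (cols : Int) (out : List String) : Prop := out = grid_position_labels_py_alt rows cols
instance (rows : Int) (cols : Int) (out : List String) : Decidable (Spec_grid_position_labels_py rows cols out) := by unfold Spec_grid_position_labels_py; infer_instance

-- ===== CLAIM (what is proved, stated in full; the proofs are below) =====
def Claim_equal_grid_position_labels_py : Prop := ∀ (rows : Int) (cols : Int), Dom_grid_position_labels_py rows cols → Spec_grid_position_labels_py rows cols (grid_position_labels_py rows cols)

-- ===== LEMMAS AND PROOFS =====

-- ===== VERDICT (by name: the statement is the Claim_ definition above) =====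
theorem grid_position_labels_py_spec : Claim_equal_grid_position_labels_py := by
  intro rows cols _
  unfold Spec_grid_position_labels_py grid_position_labels_py grid_position_labels_py_alt
  by_cases h0 : rows ≤ 0 ∨ cols ≤ 0
  · rcases h0 with h0 | h0
    · simp [PySem.List.pyRange_one_eq_nil h0, h0]
    · have h1 : ¬ (1:Int) ≤ cols := by omega
      simp [PySem.List.pyRange_one_eq_nil h0, h0, List.foldl_fixed]
  have hr : ¬ rows ≤ 0 := fun h => h0 (Or.inl h)
  have hc : ¬ cols ≤ 0 := fun h => h0 (Or.inr h)
  by_cases h1 : rows = 1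
  · by_cases h2 : cols = 1
    · subst h1; subst h2; decide
    · subst h1
      simp [h2, hr, hc, Function.comp_def, ← List.flatMap_def, ← List.map_eq_flatMap]
  · by_cases h2 : cols = 1
    · subst h2
      simp [h1, hr, hc, Function.comp_def, ← List.flatMap_def, ← List.map_eq_flatMap]
    · simp [h1, h2, hr, hc, Function.comp_def,
            ← List.flatMap_def, ← List.map_eq_flatMap, List.flatMap_map]
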